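-- pv_equiv track=rewrite | github.com/aviswerdlow/k4 | 07_TOOLS/core_hardening/run_alt_tail_test.py | calculate_tail_stats
-- ===== SOURCE A (Python) =====
-- from typing import Dict, List, Tuple, Optional
-- import string
--
-- COMMON_BIGRAMS = [
--     'TH', 'HE', 'IN', 'ER', 'AN', 'RE', 'ED', 'ON', 'ES', 'ST',
--     'EN', 'AT', 'TO', 'NT', 'HA', 'ND', 'OU', 'EA', 'NG', 'AS',
--     'OR', 'TI', 'IS', 'ET', 'IT', 'AR', 'TE', 'SE', 'HI', 'OF'
-- ]
--
-- def calculate_tail_stats(tail: str) -> Dict: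
--     """Calculate statistics about a tail string."""
--     stats = {
--         'length': len(tail),
--         'unique_chars': len(set(tail)),
--         'vowel_count': sum(1 for c in tail if c in 'AEIOU'),
--         'consonant_count': sum(1 for c in tail if c in string.ascii_uppercase and c not in 'AEIOU'),
--         'bigram_score': 0
--     }
--
--     # Count common bigrams
--     for i in range(len(tail) - 1):
--         bigram = tail[i:i+2]
--         if bigram in COMMON_BIGRAMS:
--             stats['bigram_score'] += 1
--
--     return stats
-- ===== SOURCE B (Python) =====
-- COMMON_BIGRAMS = [
--     'TH', 'HE', 'IN', 'ER', 'AN', 'RE', 'ED', 'ON', 'ES', 'ST',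
--     'EN', 'AT', 'TO', 'NT', 'HA', 'ND', 'OU', 'EA', 'NG', 'AS',
--     'OR', 'TI', 'IS', 'ET', 'IT', 'AR', 'TE', 'SE', 'HI', 'OF'
-- ]
--
-- def calculate_tail_stats(tail: str) -> dict:
--     """Calculate statistics about a tail string in ONE fused pass.
--
--     A single loop maintains every statistic at once: a running length,
--     a set of characters seen so far, vowel/consonant counters, and the
--     bigram score via the previously seen character.
--     """
--     length = 0
--     seen = set()
--     vowels = 0
--     consonants = 0
--     bigram_score = 0
--     prev = None
--     for c in tail:
--         length += 1
--         seen.add(c)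
--         if c in 'AEIOU':
--             vowels += 1
--         elif 'A' <= c <= 'Z':
--             consonants += 1
--         if prev is not None and prev + c in COMMON_BIGRAMS:
--             bigram_score += 1
--         prev = c
--     return {
--         'length': length,
--         'unique_chars': len(seen),
--         'vowel_count': vowels,
--         'consonant_count': consonants,
--         'bigram_score': bigram_score,
--     }
-- ===== Notes on version B (the rewrite author's own statement) =====
-- stated objective: alternative
-- what changed: A computes each statistic by a separate full scan (len, set(), two generator-sums, and an index loop slicing tail[i:i+2]); B is one fused loop with a six-part accumulator that maintains length, a seen-set, vowel and consonant counters (if/elif range test instead of ascii_uppercase membership) and the bigram score via the previously seen character, so the string is traversed exactly once.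
import Mathlib
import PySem

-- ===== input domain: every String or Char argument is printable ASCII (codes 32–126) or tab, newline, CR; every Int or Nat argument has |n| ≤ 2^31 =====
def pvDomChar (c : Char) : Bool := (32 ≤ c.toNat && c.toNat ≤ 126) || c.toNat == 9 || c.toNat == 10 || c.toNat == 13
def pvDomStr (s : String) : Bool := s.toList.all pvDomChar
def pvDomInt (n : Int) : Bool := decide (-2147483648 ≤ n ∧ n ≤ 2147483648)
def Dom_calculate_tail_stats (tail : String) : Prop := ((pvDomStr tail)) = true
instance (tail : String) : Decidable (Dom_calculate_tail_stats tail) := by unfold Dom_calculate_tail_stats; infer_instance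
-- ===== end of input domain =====

-- B fuses A's four separate scans of the string into ONE loop whose accumulator carries all five
-- statistics at once (length, seen-set, vowel/consonant counters, bigram score via the previous char).

-- ===== PORT A =====
def COMMON_BIGRAMS : List (List Char) :=
  [['T','H'], ['H','E'], ['I','N'], ['E','R'], ['A','N'], ['R','E'], ['E','D'], ['O','N'], ['E','S'], ['S','T'],
   ['E','N'], ['A','T'], ['T','O'], ['N','T'], ['H','A'], ['N','D'], ['O','U'], ['E','A'], ['N','G'], ['A','S'],
   ['O','R'], ['T','I'], ['I','S'], ['E','T'], ['I','T'], ['A','R'], ['T','E'], ['S','E'], ['H','I'], ['O','F']]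

-- the string constant 'AEIOU' (membership of a 1-char c in it is char membership)
def VOWELS : List Char := ['A','E','I','O','U']
-- string.ascii_uppercase
def ASCII_UPPERCASE : List Char := ['A','B','C','D','E','F','G','H','I','J','K','L','M','N','O','P','Q','R','S','T','U','V','W','X','Y','Z']

-- literal port of A: dict literal (three scans of tail), then the bigram loop bumps 'bigram_score'
def calculate_tail_stats (tail : String) : List (String × Int) :=
  let cs := tail.toList
  let stats : PySem.Dict String Int := PySem.Dict.ofList
    [("length", PySem.List.len cs),
     ("unique_chars", PySem.List.len (PySem.Set.ofList cs)),
     ("vowel_count", ((cs.filter (fun c => VOWELS.contains c)).map (fun _ => (1 : Int))).sum),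
     ("consonant_count", ((cs.filter (fun c => ASCII_UPPERCASE.contains c && !(VOWELS.contains c))).map (fun _ => (1 : Int))).sum),
     ("bigram_score", 0)]
  let stats := (PySem.List.pyRange 0 (PySem.List.len cs - 1) 1).foldl
    (fun d i =>
      if COMMON_BIGRAMS.contains (PySem.List.slice cs (some i) (some (i + 2)))
      then d.modify "bigram_score" 0 (· + 1) else d) stats
  stats.items

-- ===== PORT B =====
-- literal port of B: the state of the fused loop (length, seen, vowels, consonants, bigram_score, prev)
def pvStep (s : Int × PySem.Set Char × Int × Int × Int × Option Char) (c : Char) :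
    Int × PySem.Set Char × Int × Int × Int × Option Char :=
  let length := s.1 + 1
  let seen := PySem.Set.add s.2.1 c
  let vc : Int × Int :=
    if VOWELS.contains c then (s.2.2.1 + 1, s.2.2.2.1)
    else if 'A' ≤ c && c ≤ 'Z' then (s.2.2.1, s.2.2.2.1 + 1)
    else (s.2.2.1, s.2.2.2.1)
  let big := match s.2.2.2.2.2 with
    | some p => if COMMON_BIGRAMS.contains [p, c] then s.2.2.2.2.1 + 1 else s.2.2.2.2.1
    | none => s.2.2.2.2.1
  (length, seen, vc.1, vc.2, big, some c)

def calculate_tail_stats_alt (tail : String) : List (String × Int) :=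
  let st := tail.toList.foldl pvStep (0, PySem.Set.empty, 0, 0, 0, none)
  [("length", st.1),
   ("unique_chars", PySem.Set.len st.2.1),
   ("vowel_count", st.2.2.1),
   ("consonant_count", st.2.2.2.1),
   ("bigram_score", st.2.2.2.2.1)]

-- ===== PRECONDITION & SPEC =====
def Spec_calculate_tail_stats (tail : String) (out : List (String × Int)) : Prop := out = calculate_tail_stats_alt tail
instance (tail : String) (out : List (String × Int)) : Decidable (Spec_calculate_tail_stats tail out) := by unfold Spec_calculate_tail_stats; infer_instance

-- ===== CLAIM (what is proved, stated in full; the proofs are below) =====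
def Claim_equal_calculate_tail_stats : Prop := ∀ (tail : String), Dom_calculate_tail_stats tail → Spec_calculate_tail_stats tail (calculate_tail_stats tail)

-- ===== LEMMAS AND PROOFS =====

-- A's stats dict, with the five fixed keys; 'bigram_score' last
def mkStats (a b c e x : Int) : PySem.Dict String Int :=
  PySem.Dict.mk [("length", a), ("unique_chars", b), ("vowel_count", c), ("consonant_count", e), ("bigram_score", x)]

theorem ofList_stats (a b c e x : Int) :
    PySem.Dict.ofList [("length", a), ("unique_chars", b), ("vowel_count", c), ("consonant_count", e), ("bigram_score", x)]
      = mkStats a b c e x := rfl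

theorem modify_stats (a b c e x : Int) :
    (mkStats a b c e x).modify "bigram_score" 0 (· + 1) = mkStats a b c e (x + 1) := rfl

-- the bigram loop only bumps the 'bigram_score' slot, once per index passing the test
theorem fold_bump (l : List Int) (q : Int → Bool) (a b c e x : Int) :
    l.foldl (fun d i => if q i then d.modify "bigram_score" 0 (· + 1) else d) (mkStats a b c e x)
      = mkStats a b c e (x + (l.countP q : Int)) := by
  induction l generalizing x with
  | nil => simp
  | cons h t ih =>
    simp only [List.foldl_cons]
    by_cases hq : q h
    · rw [if_pos hq, modify_stats, ih, List.countP_cons, if_pos hq]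
      push_cast; ring_nf
    · rw [if_neg hq, ih, List.countP_cons, if_neg hq]
      norm_num

theorem char_eq_iff_toNat (c d : Char) : c = d ↔ c.toNat = d.toNat :=
  ⟨fun h => h ▸ rfl, fun h => Char.ext (UInt32.toNat_inj.mp h)⟩

theorem char_le_iff_toNat (c d : Char) : c ≤ d ↔ c.toNat ≤ d.toNat := by
  rw [Char.le_def, UInt32.le_iff_toNat_le]; exact Iff.rfl

-- membership in string.ascii_uppercase is the range test 'A' <= c <= 'Z'
theorem upper_mem_iff_range (c : Char) :
    (ASCII_UPPERCASE.contains c) = (decide ('A' ≤ c) && decide (c ≤ 'Z')) := by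
  simp only [ASCII_UPPERCASE, List.contains_eq_mem, List.mem_cons, List.not_mem_nil, or_false,
    char_eq_iff_toNat, char_le_iff_toNat, ← Bool.decide_and, decide_eq_decide,
    show ('A'.toNat = 65) from rfl, show ('B'.toNat = 66) from rfl, show ('C'.toNat = 67) from rfl, show ('D'.toNat = 68) from rfl, show ('E'.toNat = 69) from rfl, show ('F'.toNat = 70) from rfl, show ('G'.toNat = 71) from rfl, show ('H'.toNat = 72) from rfl, show ('I'.toNat = 73) from rfl, show ('J'.toNat = 74) from rfl, show ('K'.toNat = 75) from rfl, show ('L'.toNat = 76) from rfl, show ('M'.toNat = 77) from rfl, show ('N'.toNat = 78) from rfl, show ('O'.toNat = 79) from rfl, show ('P'.toNat = 80) from rfl, show ('Q'.toNat = 81) from rfl, show ('R'.toNat = 82) from rfl, show ('S'.toNat = 83) from rfl, show ('T'.toNat = 84) from rfl, show ('U'.toNat = 85) from rfl, show ('V'.toNat = 86) from rfl, show ('W'.toNat = 87) from rfl, show ('X'.toNat = 88) from rfl, show ('Y'.toNat = 89) from rfl, show ('Z'.toNat = 90) from rfl]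
  omega

-- sum of the constant 1 over a list is its length
theorem sum_map_one (l : List Char) : (l.map (fun _ => (1 : Int))).sum = (l.length : Int) := by
  induction l with
  | nil => rfl
  | cons a t ih => simp [add_comm]

-- the adjacent pairs seen by B's loop when the previous character is 'prev'
def pairsFrom : Option Char → List Char → List (Char × Char)
  | _, [] => []
  | none, c :: t => pairsFrom (some c) t
  | some p, c :: t => (p, c) :: pairsFrom (some c) t

theorem pairsFrom_some (p : Char) (cs : List Char) : pairsFrom (some p) cs = (p :: cs).zip cs := by
  induction cs generalizing p with
  | nil => rfl
  | cons c t ih => simp [pairsFrom, ih]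

theorem pairsFrom_none (cs : List Char) : pairsFrom none cs = cs.zip cs.tail := by
  cases cs with
  | nil => rfl
  | cons c t => simpa using pairsFrom_some c t

-- the index loop over tail[i:i+2] counts the same bigrams as the loop over adjacent pairs
theorem range_drop_take_eq_zip (memB : List Char → Bool) (cs : List Char) :
    (List.range (cs.length - 1)).countP (fun k => memB ((cs.drop k).take 2))
      = (cs.zip cs.tail).countP (fun p => memB [p.1, p.2]) := by
  induction cs with
  | nil => rfl
  | cons c rest ih =>
    match rest with
    | [] => rfl
    | c2 :: t =>
      have hlen : (c :: c2 :: t).length - 1 = t.length + 1 := by simp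
      rw [hlen, List.range_succ_eq_map, List.countP_cons, List.countP_map]
      have h1 : ((c :: c2 :: t).zip (c :: c2 :: t).tail).countP (fun p => memB [p.1, p.2])
          = ((c2 :: t).zip t).countP (fun p => memB [p.1, p.2]) + if memB [c, c2] then 1 else 0 := by
        simp [List.countP_cons]
      have h2 : (List.range t.length).countP ((fun k => memB (((c :: c2 :: t).drop k).take 2)) ∘ Nat.succ)
          = (List.range ((c2 :: t).length - 1)).countP (fun k => memB (((c2 :: t).drop k).take 2)) := by
        simp [Function.comp_def]
      rw [h2, ih, h1]
      simp

-- the consonant test B performs, and its agreement with A's filter predicate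
def consTest (c : Char) : Bool := !VOWELS.contains c && (decide ('A' ≤ c) && decide (c ≤ 'Z'))

-- full characterisation of B's fused loop, by induction on the string with a general state
theorem foldl_pvStep (cs : List Char) (L : Int) (S : PySem.Set Char) (V C B : Int) (prev : Option Char) :
    cs.foldl pvStep (L, S, V, C, B, prev)
      = (L + (cs.length : Int), cs.foldl PySem.Set.add S,
         V + (cs.countP (fun c => VOWELS.contains c) : Int),
         C + (cs.countP consTest : Int),
         B + ((pairsFrom prev cs).countP (fun p => COMMON_BIGRAMS.contains [p.1, p.2]) : Int),
         if cs.isEmpty then prev else cs.getLast?) := by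
  induction cs generalizing L S V C B prev with
  | nil => simp
  | cons c t ih =>
    have hstep : pvStep (L, S, V, C, B, prev) c
        = (L + 1, PySem.Set.add S c,
           (if VOWELS.contains c then V + 1 else V),
           (if consTest c then C + 1 else C),
           (match prev with
            | some p => if COMMON_BIGRAMS.contains [p, c] then B + 1 else B
            | none => B), some c) := by
      simp only [pvStep, consTest, List.contains_eq_mem, ← Bool.decide_and]
      by_cases hv : c ∈ VOWELS
      · simp [hv]
      · by_cases hr : 'A' ≤ c ∧ c ≤ 'Z' <;> simp [hv, hr]
    rw [List.foldl_cons, hstep, ih]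
    have hlast : (if t.isEmpty then some c else t.getLast?)
        = if (c :: t).isEmpty then prev else (c :: t).getLast? := by
      cases t <;> simp [List.getLast?]
    refine Prod.ext ?_ (Prod.ext rfl (Prod.ext ?_ (Prod.ext ?_ (Prod.ext ?_ hlast))))
    · simp only [List.length_cons]; push_cast; ring
    · simp only [List.countP_cons]
      split_ifs <;> simp_all <;> ring
    · simp only [List.countP_cons]
      split_ifs <;> simp_all <;> ring
    · cases prev with
      | none => simp [pairsFrom]
      | some p =>
        simp only [pairsFrom, List.countP_cons]
        split_ifs <;> simp_all <;> ring

-- ===== VERDICT (by name: the statement is the Claim_ definition above) =====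
theorem calculate_tail_stats_spec : Claim_equal_calculate_tail_stats := by
  intro tail _
  unfold Spec_calculate_tail_stats
  show calculate_tail_stats tail = calculate_tail_stats_alt tail
  simp only [calculate_tail_stats, calculate_tail_stats_alt]
  set cs := tail.toList with hcs
  rw [ofList_stats, fold_bump, foldl_pvStep]
  -- field 1: length
  have h1 : PySem.List.len cs = 0 + (cs.length : Int) := by
    rw [PySem.List.len_eq]; ring
  rw [h1]
  -- field 2: unique_chars
  have h2 : PySem.List.len (PySem.Set.ofList cs) = PySem.Set.len (cs.foldl PySem.Set.add PySem.Set.empty) := by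
    have he : (PySem.Set.empty : PySem.Set Char) = [] := rfl
    rw [he, ← PySem.Set.ofList_eq_foldl]; rfl
  -- field 3: vowel_count
  have h3 : ((cs.filter (fun c => VOWELS.contains c)).map (fun _ => (1 : Int))).sum
      = 0 + (cs.countP (fun c => VOWELS.contains c) : Int) := by
    rw [sum_map_one, zero_add, List.countP_eq_length_filter]
  -- field 4: consonant_count
  have h4 : ((cs.filter (fun c => ASCII_UPPERCASE.contains c && !(VOWELS.contains c))).map (fun _ => (1 : Int))).sum
      = 0 + (cs.countP consTest : Int) := by
    rw [sum_map_one, zero_add, ← List.countP_eq_length_filter]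
    exact_mod_cast List.countP_congr (fun c _ => by
      rw [consTest, upper_mem_iff_range, Bool.and_comm])
  -- field 5: bigram_score (A's index loop = B's adjacent-pair loop)
  have h5 : ((0 : Int) +
        ((PySem.List.pyRange 0 (0 + (cs.length : Int) - 1) 1).countP
          (fun i => COMMON_BIGRAMS.contains (PySem.List.slice cs (some i) (some (i + 2)))) : Int))
      = 0 + ((pairsFrom none cs).countP (fun p => COMMON_BIGRAMS.contains [p.1, p.2]) : Int) := by
    rw [show (0 : Int) + (cs.length : Int) - 1 = (cs.length : Int) - 1 by ring,
      pairsFrom_none, PySem.List.pyRange_one, List.countP_map]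
    have hb : ((cs.length : Int) - 1 - 0).toNat = cs.length - 1 := by omega
    rw [hb]
    rw [List.countP_congr (q := fun k : Nat => COMMON_BIGRAMS.contains ((cs.drop k).take 2)) (fun k _ => by
      simp only [Function.comp_def, zero_add]
      have e : ((k : Int) + 2) = ((k + 2 : Nat) : Int) := by push_cast; ring
      rw [e, PySem.List.slice_natCast, Nat.add_sub_cancel_left])]
    rw [range_drop_take_eq_zip]
  rw [h2, h3, h4, h5]
  rfl
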